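-- pv_equiv track=rewrite | github.com/avulman/adversary-detection-as-code-lab | scripts/deploy_to_securityonion.py | build_repo_state_changes
-- ===== SOURCE A (Python) =====
-- ALLOWED_STATE_ENGINES = {"suricata", "sigma"}
--
-- def normalize_rule_for_compare(content: str) -> str:
--     return " ".join(content.split())
--
-- def build_repo_state_changes(repo_state: dict, saved_state: dict) -> list[dict]:
--     changes = []
--
--     for engine in sorted(ALLOWED_STATE_ENGINES):
--         repo_rules = repo_state.get(engine, {})
--         state_rules = saved_state.get(engine, {})
--
--         repo_names = set(repo_rules.keys())
--         state_names = set(state_rules.keys())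
--
--         # new rules > CREATE
--         for name in sorted(repo_names - state_names):
--             changes.append(
--                 {
--                     "engine": engine,
--                     "action": "create",
--                     "name": name,
--                     "new_content": repo_rules[name],
--                     "old_content": None,
--                 }
--             )
--
--         # removed rules > DELETE
--         for name in sorted(state_names - repo_names):
--             changes.append(
--                 {
--                     "engine": engine,
--                     "action": "delete",
--                     "name": name,
--                     "new_content": None,
--                     "old_content": state_rules[name],
--                 }
--             )
--
--         # modified rules > UPDATE
--         for name in sorted(repo_names & state_names):
--             repo_content = normalize_rule_for_compare(repo_rules[name])
--             state_content = normalize_rule_for_compare(state_rules[name])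
--             # compare normalized content (ignore whitespace differences)
--             if repo_content != state_content:
--                 changes.append(
--                     {
--                         "engine": engine,
--                         "action": "update",
--                         "name": name,
--                         "new_content": repo_rules[name],
--                         "old_content": state_rules[name],
--                     }
--                 )
--
--     return changes
-- ===== SOURCE B (Python) =====
-- ALLOWED_STATE_ENGINES = {"suricata", "sigma"}
--
-- def normalize_rule_for_compare(content: str) -> str:
--     return " ".join(content.split())
--
-- def build_repo_state_changes(repo_state: dict, saved_state: dict) -> list[dict]:
--     changes = []
--     for engine in sorted(ALLOWED_STATE_ENGINES):
--         repo_rules = repo_state.get(engine, {})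
--         state_rules = saved_state.get(engine, {})
--         # two-pointer merge over the two sorted key lists: no set objects,
--         # one simultaneous walk classifies every name by order comparison
--         rn = sorted(repo_rules)
--         sn = sorted(state_rules)
--         creates, deletes, updates = [], [], []
--         i = j = 0
--         while i < len(rn) or j < len(sn):
--             if j >= len(sn) or (i < len(rn) and rn[i] < sn[j]):
--                 name = rn[i]
--                 i += 1
--                 creates.append({
--                     "engine": engine, "action": "create", "name": name,
--                     "new_content": repo_rules[name], "old_content": None,
--                 })
--             elif i >= len(rn) or sn[j] < rn[i]:
--                 name = sn[j]
--                 j += 1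
--                 deletes.append({
--                     "engine": engine, "action": "delete", "name": name,
--                     "new_content": None, "old_content": state_rules[name],
--                 })
--             else:
--                 name = rn[i]
--                 i += 1
--                 j += 1
--                 if normalize_rule_for_compare(repo_rules[name]) != normalize_rule_for_compare(state_rules[name]):
--                     updates.append({
--                         "engine": engine, "action": "update", "name": name,
--                         "new_content": repo_rules[name], "old_content": state_rules[name],
--                     })
--         changes.extend(creates)
--         changes.extend(deletes)
--         changes.extend(updates)
--     return changes
-- ===== Notes on version B (the rewrite author's own statement) =====
-- stated objective: alternative
-- what changed: Per engine, A builds two key sets and runs three separate sorted set-difference/intersection scans; B sorts the two key lists once and does a single two-pointer merge walk over them, classifying each name into create/delete/update buckets by order comparison with no set operations.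
import Mathlib
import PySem

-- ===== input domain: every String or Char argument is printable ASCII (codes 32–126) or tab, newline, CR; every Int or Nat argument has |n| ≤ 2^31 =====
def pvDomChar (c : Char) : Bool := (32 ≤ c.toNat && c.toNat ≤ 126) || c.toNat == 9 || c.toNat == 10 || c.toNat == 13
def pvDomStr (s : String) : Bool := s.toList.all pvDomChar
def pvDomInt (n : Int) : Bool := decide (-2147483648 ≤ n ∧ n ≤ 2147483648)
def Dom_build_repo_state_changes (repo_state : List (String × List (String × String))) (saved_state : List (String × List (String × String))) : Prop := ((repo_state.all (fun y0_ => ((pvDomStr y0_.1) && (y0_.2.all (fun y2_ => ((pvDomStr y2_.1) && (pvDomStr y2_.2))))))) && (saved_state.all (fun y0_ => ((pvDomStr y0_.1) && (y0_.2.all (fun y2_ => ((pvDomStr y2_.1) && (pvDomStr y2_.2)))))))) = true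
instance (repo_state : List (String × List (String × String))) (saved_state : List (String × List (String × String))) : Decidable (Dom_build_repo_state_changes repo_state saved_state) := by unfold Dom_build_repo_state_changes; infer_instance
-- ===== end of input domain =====

-- B replaces A's per-engine set objects and three set-difference-then-sort scans by a single
-- two-pointer merge walk over the two sorted key lists (objective: alternative algorithm, same cost).

-- shared module context: ALLOWED_STATE_ENGINES and normalize_rule_for_compare
def pvEngines : List String := PySem.Set.ofList ["suricata", "sigma"]

def normalize_rule_for_compare (content : String) : String :=
  PySem.Str.join " " (PySem.Str.split₀ content)

-- dict.get(k, default) / d[k] on the association-list encoding (first match)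
def pvGetD (d : List (String × List (String × String))) (k : String) : List (String × String) :=
  match d with
  | [] => []
  | (k', v) :: t => if k' = k then v else pvGetD t k

def pvRuleGet (rules : List (String × String)) (k : String) : String :=
  match rules with
  | [] => ""
  | (k', v) :: t => if k' = k then v else pvRuleGet t k

-- ===== PORT A =====
def build_repo_state_changes (repo_state : List (String × List (String × String))) (saved_state : List (String × List (String × String))) : List (List (String × Option String)) :=
  (PySem.List.sorted pvEngines (fun x => x) false).foldl
    (fun changes engine =>
      let repo_rules := pvGetD repo_state engine
      let state_rules := pvGetD saved_state engine
      let repo_names := PySem.Set.ofList (repo_rules.map Prod.fst)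
      let state_names := PySem.Set.ofList (state_rules.map Prod.fst)
      let changes := (PySem.List.sorted (PySem.Set.diff repo_names state_names) (fun x => x) false).foldl
        (fun ch name => ch ++ [[("engine", some engine), ("action", some "create"), ("name", some name),
            ("new_content", some (pvRuleGet repo_rules name)), ("old_content", none)]]) changes
      let changes := (PySem.List.sorted (PySem.Set.diff state_names repo_names) (fun x => x) false).foldl
        (fun ch name => ch ++ [[("engine", some engine), ("action", some "delete"), ("name", some name),
            ("new_content", none), ("old_content", some (pvRuleGet state_rules name))]]) changes
      let changes := (PySem.List.sorted (PySem.Set.inter repo_names state_names) (fun x => x) false).foldl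
        (fun ch name =>
          if normalize_rule_for_compare (pvRuleGet repo_rules name) ≠ normalize_rule_for_compare (pvRuleGet state_rules name) then
            ch ++ [[("engine", some engine), ("action", some "update"), ("name", some name),
              ("new_content", some (pvRuleGet repo_rules name)), ("old_content", some (pvRuleGet state_rules name))]]
          else ch) changes
      changes) []

-- ===== PORT B =====
-- B's while-loop with two indices i, j over the sorted arrays rn, sn becomes the obvious
-- structural recursion on the two suffixes rn[i:], sn[j:]; the three end-appended buckets
-- are built by consing the record produced at each step onto the recursive result.
def pvMergeGo {β : Type} (crt del upd : String → β) (differ : String → Bool) :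
    List String → List String → List β × List β × List β
  | [], [] => ([], [], [])
  | a :: rt, [] =>
    let r := pvMergeGo crt del upd differ rt []
    (crt a :: r.1, r.2.1, r.2.2)
  | [], b :: st =>
    let r := pvMergeGo crt del upd differ [] st
    (r.1, del b :: r.2.1, r.2.2)
  | a :: rt, b :: st =>
    if a < b then
      let r := pvMergeGo crt del upd differ rt (b :: st)
      (crt a :: r.1, r.2.1, r.2.2)
    else if b < a then
      let r := pvMergeGo crt del upd differ (a :: rt) st
      (r.1, del b :: r.2.1, r.2.2)
    else
      let r := pvMergeGo crt del upd differ rt st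
      if differ a then (r.1, r.2.1, upd a :: r.2.2) else r
termination_by rn sn => rn.length + sn.length

def build_repo_state_changes_alt (repo_state : List (String × List (String × String))) (saved_state : List (String × List (String × String))) : List (List (String × Option String)) :=
  (PySem.List.sorted pvEngines (fun x => x) false).foldl
    (fun changes engine =>
      let repo_rules := pvGetD repo_state engine
      let state_rules := pvGetD saved_state engine
      let rn := PySem.List.sorted (PySem.Set.ofList (repo_rules.map Prod.fst)) (fun x => x) false
      let sn := PySem.List.sorted (PySem.Set.ofList (state_rules.map Prod.fst)) (fun x => x) false
      let buckets := pvMergeGo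
        (fun name => [("engine", some engine), ("action", some "create"), ("name", some name),
            ("new_content", some (pvRuleGet repo_rules name)), ("old_content", none)])
        (fun name => [("engine", some engine), ("action", some "delete"), ("name", some name),
            ("new_content", none), ("old_content", some (pvRuleGet state_rules name))])
        (fun name => [("engine", some engine), ("action", some "update"), ("name", some name),
            ("new_content", some (pvRuleGet repo_rules name)), ("old_content", some (pvRuleGet state_rules name))])
        (fun name => normalize_rule_for_compare (pvRuleGet repo_rules name) != normalize_rule_for_compare (pvRuleGet state_rules name))
        rn sn
      changes ++ buckets.1 ++ buckets.2.1 ++ buckets.2.2) []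

-- ===== PRECONDITION & SPEC =====
def Spec_build_repo_state_changes (repo_state : List (String × List (String × String))) (saved_state : List (String × List (String × String))) (out : List (List (String × Option String))) : Prop := out = build_repo_state_changes_alt repo_state saved_state
instance (repo_state : List (String × List (String × String))) (saved_state : List (String × List (String × String))) (out : List (List (String × Option String))) : Decidable (Spec_build_repo_state_changes repo_state saved_state out) := by unfold Spec_build_repo_state_changes; infer_instance

-- ===== CLAIM (what is proved, stated in full; the proofs are below) =====
def Claim_equal_build_repo_state_changes : Prop := ∀ (repo_state : List (String × List (String × String))) (saved_state : List (String × List (String × String))), Dom_build_repo_state_changes repo_state saved_state → Spec_build_repo_state_changes repo_state saved_state (build_repo_state_changes repo_state saved_state)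

-- ===== LEMMAS AND PROOFS =====

-- the merge walk over two strictly sorted lists = the three membership filters
theorem pvMergeGo_eq {β : Type} (crt del upd : String → β) (differ : String → Bool)
    (rn sn : List String) (hr : rn.Pairwise (· < ·)) (hs : sn.Pairwise (· < ·)) :
    pvMergeGo crt del upd differ rn sn =
      ((rn.filter (fun x => !decide (x ∈ sn))).map crt,
       (sn.filter (fun x => !decide (x ∈ rn))).map del,
       ((rn.filter (fun x => decide (x ∈ sn) && differ x)).map upd)) := by
  induction rn generalizing sn with
  | nil =>
    induction sn with
    | nil => simp [pvMergeGo]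
    | cons b st ihs =>
      rw [pvMergeGo, ihs (List.Pairwise.sublist (List.sublist_cons_self b st) hs)]
      simp
  | cons a rt ihr =>
    induction sn with
    | nil =>
      rw [pvMergeGo, ihr [] (List.Pairwise.sublist (List.sublist_cons_self a rt) hr) List.Pairwise.nil]
      simp
    | cons b st ihs =>
      have hrt : rt.Pairwise (· < ·) := List.Pairwise.sublist (List.sublist_cons_self a rt) hr
      have hst : st.Pairwise (· < ·) := List.Pairwise.sublist (List.sublist_cons_self b st) hs
      have hagt : ∀ x ∈ rt, a < x := (List.pairwise_cons.mp hr).1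
      have hbgt : ∀ x ∈ st, b < x := (List.pairwise_cons.mp hs).1
      rcases lt_trichotomy a b with hab | hab | hab
      · -- a < b : a only in repo
        have hanotin : a ∉ b :: st := by
          intro h
          rcases List.mem_cons.mp h with h | h
          · exact absurd h (ne_of_lt hab)
          · exact absurd rfl (ne_of_lt (hab.trans (hbgt a h)))
        have hdel : (b :: st).filter (fun x => !decide (x ∈ a :: rt)) =
            (b :: st).filter (fun x => !decide (x ∈ rt)) := by
          refine List.filter_congr ?_
          intro x hx
          have hax : a < x := by
            rcases List.mem_cons.mp hx with h | h
            · exact h ▸ hab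
            · exact hab.trans (hbgt x h)
          simp [List.mem_cons, (ne_of_lt hax).symm]
        rw [pvMergeGo]
        simp only [if_pos hab]
        rw [ihr (b :: st) hrt hs,
          List.filter_cons_of_pos (p := fun x => !decide (x ∈ b :: st)) (by simp [hanotin]),
          List.filter_cons_of_neg (p := fun x => decide (x ∈ b :: st) && differ x) (by simp [hanotin]),
          hdel]
        rfl
      · -- a = b : in both
        subst hab
        have hanotrt : a ∉ rt := fun h => absurd rfl (ne_of_lt (hagt a h))
        have hanotst : a ∉ st := fun h => absurd rfl (ne_of_lt (hbgt a h))
        have hcre : rt.filter (fun x => !decide (x ∈ a :: st)) =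
            rt.filter (fun x => !decide (x ∈ st)) := by
          refine List.filter_congr ?_
          intro x hx
          simp [List.mem_cons, (ne_of_lt (hagt x hx)).symm]
        have hupd : rt.filter (fun x => decide (x ∈ a :: st) && differ x) =
            rt.filter (fun x => decide (x ∈ st) && differ x) := by
          refine List.filter_congr ?_
          intro x hx
          simp [List.mem_cons, (ne_of_lt (hagt x hx)).symm]
        have hdel : st.filter (fun x => !decide (x ∈ a :: rt)) =
            st.filter (fun x => !decide (x ∈ rt)) := by
          refine List.filter_congr ?_
          intro x hx
          simp [List.mem_cons, (ne_of_lt (hbgt x hx)).symm]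
        rw [pvMergeGo]
        simp only [lt_irrefl, ite_false]
        rw [ihr st hrt hst,
          List.filter_cons_of_neg (p := fun x => !decide (x ∈ a :: st)) (by simp),
          List.filter_cons_of_neg (p := fun x => !decide (x ∈ a :: rt)) (by simp),
          hcre, hdel]
        by_cases hd : differ a = true
        · rw [List.filter_cons_of_pos (p := fun x => decide (x ∈ a :: st) && differ x) (by simp [hd]),
            hupd, if_pos hd]
          rfl
        · rw [List.filter_cons_of_neg (p := fun x => decide (x ∈ a :: st) && differ x) (by simp [hd]),
            hupd, if_neg hd]
      · -- b < a : b only in state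
        have hbnotin : b ∉ a :: rt := by
          intro h
          rcases List.mem_cons.mp h with h | h
          · exact absurd h (ne_of_lt hab)
          · exact absurd rfl (ne_of_lt (hab.trans (hagt b h)))
        have hcre : (a :: rt).filter (fun x => !decide (x ∈ b :: st)) =
            (a :: rt).filter (fun x => !decide (x ∈ st)) := by
          refine List.filter_congr ?_
          intro x hx
          have hbx : b < x := by
            rcases List.mem_cons.mp hx with h | h
            · exact h ▸ hab
            · exact hab.trans (hagt x h)
          simp [List.mem_cons, (ne_of_lt hbx).symm]
        have hupd : (a :: rt).filter (fun x => decide (x ∈ b :: st) && differ x) =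
            (a :: rt).filter (fun x => decide (x ∈ st) && differ x) := by
          refine List.filter_congr ?_
          intro x hx
          have hbx : b < x := by
            rcases List.mem_cons.mp hx with h | h
            · exact h ▸ hab
            · exact hab.trans (hagt x h)
          simp [List.mem_cons, (ne_of_lt hbx).symm]
        rw [pvMergeGo]
        simp only [if_neg (not_lt.mpr (le_of_lt hab)), if_pos hab]
        rw [ihs hst,
          List.filter_cons_of_pos (p := fun x => !decide (x ∈ a :: rt)) (by simp [hbnotin]),
          hcre, hupd]
        rfl

-- sorting a nodup list S = filtering the strictly sorted W by S's defining predicate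
theorem sorted_eq_filter_sorted (S W : List String) (p : String → Bool)
    (hS : S.Nodup) (hW : W.Nodup)
    (hmem : ∀ x, x ∈ S ↔ (x ∈ W ∧ p x = true)) :
    PySem.List.sorted S (fun x => x) false = (PySem.List.sorted W (fun x => x) false).filter p := by
  have hWperm : (PySem.List.sorted W (fun x => x) false).Perm W := PySem.List.sorted_perm W (fun x => x) false
  have hWnodup : (PySem.List.sorted W (fun x => x) false).Nodup := hWperm.nodup_iff.mpr hW
  have hle : (PySem.List.sorted W (fun x => x) false).Pairwise (fun a b => a ≤ b) :=
    PySem.List.sorted_pairwise W (fun x => x)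
  have hlt : (PySem.List.sorted W (fun x => x) false).Pairwise (fun a b : String => a < b) :=
    (hle.and hWnodup).imp (fun hab => lt_of_le_of_ne hab.1 hab.2)
  refine PySem.List.sorted_eq_of_perm_of_pairwise_lt S ((PySem.List.sorted W (fun x => x) false).filter p) (fun x => x) ?_ (hlt.filter p)
  refine (List.perm_ext_iff_of_nodup (hWnodup.filter p) hS).mpr ?_
  intro a
  simp only [List.mem_filter, hWperm.mem_iff, hmem]

-- strict sortedness of sorted applied to a nodup list
theorem sorted_pairwise_lt (S : List String) (hS : S.Nodup) :
    (PySem.List.sorted S (fun x => x) false).Pairwise (· < ·) := by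
  have hperm : (PySem.List.sorted S (fun x => x) false).Perm S := PySem.List.sorted_perm S (fun x => x) false
  have hnd : (PySem.List.sorted S (fun x => x) false).Nodup := hperm.nodup_iff.mpr hS
  have hle : (PySem.List.sorted S (fun x => x) false).Pairwise (fun a b => a ≤ b) :=
    PySem.List.sorted_pairwise S (fun x => x)
  exact (hle.and hnd).imp (fun hab => lt_of_le_of_ne hab.1 hab.2)

-- per-engine step equality: A's three set scans = B's merge walk
set_option maxHeartbeats 4000000 in
theorem per_engine_eq (engine : String) (changes : List (List (String × Option String)))
    (repo_rules state_rules : List (String × String)) :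
    (let repo_names := PySem.Set.ofList (repo_rules.map Prod.fst)
     let state_names := PySem.Set.ofList (state_rules.map Prod.fst)
     let changes := (PySem.List.sorted (PySem.Set.diff repo_names state_names) (fun x => x) false).foldl
        (fun ch name => ch ++ [[("engine", some engine), ("action", some "create"), ("name", some name),
            ("new_content", some (pvRuleGet repo_rules name)), ("old_content", none)]]) changes
     let changes := (PySem.List.sorted (PySem.Set.diff state_names repo_names) (fun x => x) false).foldl
        (fun ch name => ch ++ [[("engine", some engine), ("action", some "delete"), ("name", some name),
            ("new_content", none), ("old_content", some (pvRuleGet state_rules name))]]) changes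
     let changes := (PySem.List.sorted (PySem.Set.inter repo_names state_names) (fun x => x) false).foldl
        (fun ch name =>
          if normalize_rule_for_compare (pvRuleGet repo_rules name) ≠ normalize_rule_for_compare (pvRuleGet state_rules name) then
            ch ++ [[("engine", some engine), ("action", some "update"), ("name", some name),
              ("new_content", some (pvRuleGet repo_rules name)), ("old_content", some (pvRuleGet state_rules name))]]
          else ch) changes
     changes)
    = (let rn := PySem.List.sorted (PySem.Set.ofList (repo_rules.map Prod.fst)) (fun x => x) false
       let sn := PySem.List.sorted (PySem.Set.ofList (state_rules.map Prod.fst)) (fun x => x) false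
       let buckets := pvMergeGo
        (fun name => [("engine", some engine), ("action", some "create"), ("name", some name),
            ("new_content", some (pvRuleGet repo_rules name)), ("old_content", none)])
        (fun name => [("engine", some engine), ("action", some "delete"), ("name", some name),
            ("new_content", none), ("old_content", some (pvRuleGet state_rules name))])
        (fun name => [("engine", some engine), ("action", some "update"), ("name", some name),
            ("new_content", some (pvRuleGet repo_rules name)), ("old_content", some (pvRuleGet state_rules name))])
        (fun name => normalize_rule_for_compare (pvRuleGet repo_rules name) != normalize_rule_for_compare (pvRuleGet state_rules name))
        rn sn
       changes ++ buckets.1 ++ buckets.2.1 ++ buckets.2.2) := by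
  have hRnd : (PySem.Set.ofList (repo_rules.map Prod.fst) : List String).Nodup := PySem.Set.nodup_ofList _
  have hSnd : (PySem.Set.ofList (state_rules.map Prod.fst) : List String).Nodup := PySem.Set.nodup_ofList _
  have hrn := sorted_pairwise_lt _ hRnd
  have hsn := sorted_pairwise_lt _ hSnd
  have hmemR : ∀ x, x ∈ PySem.List.sorted (PySem.Set.ofList (repo_rules.map Prod.fst)) (fun x => x) false ↔ x ∈ (PySem.Set.ofList (repo_rules.map Prod.fst) : List String) := by
    intro x; exact (PySem.List.sorted_perm _ _ false).mem_iff
  have hmemS : ∀ x, x ∈ PySem.List.sorted (PySem.Set.ofList (state_rules.map Prod.fst)) (fun x => x) false ↔ x ∈ (PySem.Set.ofList (state_rules.map Prod.fst) : List String) := by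
    intro x; exact (PySem.List.sorted_perm _ _ false).mem_iff
  have h1 : PySem.List.sorted ((PySem.Set.ofList (repo_rules.map Prod.fst)).diff (PySem.Set.ofList (state_rules.map Prod.fst))) (fun x => x) false
      = (PySem.List.sorted (PySem.Set.ofList (repo_rules.map Prod.fst)) (fun x => x) false).filter
          (fun x => !decide (x ∈ PySem.List.sorted (PySem.Set.ofList (state_rules.map Prod.fst)) (fun x => x) false)) := by
    refine sorted_eq_filter_sorted _ _ _ (PySem.Set.nodup_diff _ _ hRnd) hRnd ?_
    intro x
    simp only [PySem.Set.mem_diff, hmemS, Bool.not_eq_true', decide_eq_false_iff_not]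
  have h2 : PySem.List.sorted ((PySem.Set.ofList (state_rules.map Prod.fst)).diff (PySem.Set.ofList (repo_rules.map Prod.fst))) (fun x => x) false
      = (PySem.List.sorted (PySem.Set.ofList (state_rules.map Prod.fst)) (fun x => x) false).filter
          (fun x => !decide (x ∈ PySem.List.sorted (PySem.Set.ofList (repo_rules.map Prod.fst)) (fun x => x) false)) := by
    refine sorted_eq_filter_sorted _ _ _ (PySem.Set.nodup_diff _ _ hSnd) hSnd ?_
    intro x
    simp only [PySem.Set.mem_diff, hmemR, Bool.not_eq_true', decide_eq_false_iff_not]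
  have h3 : (PySem.List.sorted ((PySem.Set.ofList (repo_rules.map Prod.fst)).inter (PySem.Set.ofList (state_rules.map Prod.fst))) (fun x => x) false).filter
        (fun x => decide (normalize_rule_for_compare (pvRuleGet repo_rules x) ≠ normalize_rule_for_compare (pvRuleGet state_rules x)))
      = (PySem.List.sorted (PySem.Set.ofList (repo_rules.map Prod.fst)) (fun x => x) false).filter
          (fun x => decide (x ∈ PySem.List.sorted (PySem.Set.ofList (state_rules.map Prod.fst)) (fun x => x) false) &&
            (normalize_rule_for_compare (pvRuleGet repo_rules x) != normalize_rule_for_compare (pvRuleGet state_rules x))) := by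
    have hi : PySem.List.sorted ((PySem.Set.ofList (repo_rules.map Prod.fst)).inter (PySem.Set.ofList (state_rules.map Prod.fst))) (fun x => x) false
        = (PySem.List.sorted (PySem.Set.ofList (repo_rules.map Prod.fst)) (fun x => x) false).filter
            (fun x => decide (x ∈ PySem.List.sorted (PySem.Set.ofList (state_rules.map Prod.fst)) (fun x => x) false)) := by
      refine sorted_eq_filter_sorted _ _ _ (PySem.Set.nodup_inter _ _ hRnd) hRnd ?_
      intro x
      simp only [PySem.Set.mem_inter, hmemS, decide_eq_true_eq]
    rw [hi, List.filter_filter]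
    refine List.filter_congr ?_
    intro x _
    by_cases hm : x ∈ PySem.List.sorted (PySem.Set.ofList (state_rules.map Prod.fst)) (fun x => x) false <;>
      by_cases hn : normalize_rule_for_compare (pvRuleGet repo_rules x) = normalize_rule_for_compare (pvRuleGet state_rules x) <;>
        simp [hm, hn, bne]
  simp only [PySem.List.foldl_append_singleton_eq_map, PySem.List.foldl_append_ite,
    pvMergeGo_eq _ _ _ _ _ _ hrn hsn, List.append_assoc, h1, h2, h3]

-- ===== VERDICT (by name: the statement is the Claim_ definition above) =====
theorem build_repo_state_changes_spec : Claim_equal_build_repo_state_changes := by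
  intro repo_state saved_state _
  unfold Spec_build_repo_state_changes build_repo_state_changes build_repo_state_changes_alt
  refine PySem.List.foldl_congr_mem _ _ _ _ ?_
  intro acc engine _
  simpa using per_engine_eq engine acc (pvGetD repo_state engine) (pvGetD saved_state engine)
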